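-- pv_equiv track=rewrite | github.com/Rahkovsky/llm_comp_graph | scripts/generate_questions.py | _is_yes_no_question
-- ===== SOURCE A (Python) =====
-- def _is_yes_no_question(question: str) -> bool:
--     """Detect if a question is yes/no style."""
--     if not question:
--         return False
--     q = question.strip().lower()
--     # Common yes/no starts
--     yn_starts = [
--         "is ",
--         "are ",
--         "was ",
--         "were ",
--         "do ",
--         "does ",
--         "did ",
--         "can ",
--         "could ",
--         "should ",
--         "would ",
--         "will ",
--         "has ",
--         "have ",
--         "had ",
--         "isn't ",
--         "aren't ",
--         "doesn't ",
--         "can't ",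
--         "won't ",
--         "haven't ",
--         "hasn't ",
--     ]
--     return any(q.startswith(s) for s in yn_starts)
-- ===== SOURCE B (Python) =====
-- _YN_SET = {
--     "is ", "are ", "was ", "were ", "do ", "does ", "did ", "can ",
--     "could ", "should ", "would ", "will ", "has ", "have ", "had ",
--     "isn't ", "aren't ", "doesn't ", "can't ", "won't ", "haven't ", "hasn't ",
-- }
--
--
-- def _is_yes_no_question(question: str) -> bool:
--     """Detect if a question is yes/no style."""
--     if not question:
--         return False
--     q = question.strip().lower()
--     idx = q.find(" ")
--     if idx == -1:
--         return False
--     return q[: idx + 1] in _YN_SET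
-- ===== Notes on version B (the rewrite author's own statement) =====
-- stated objective: idiomatic
-- what changed: Replaces the scan over 22 startswith tests by extracting the first word plus its trailing space (q[:q.find(' ')+1]) and doing a single hash-set membership lookup.
import Mathlib
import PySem

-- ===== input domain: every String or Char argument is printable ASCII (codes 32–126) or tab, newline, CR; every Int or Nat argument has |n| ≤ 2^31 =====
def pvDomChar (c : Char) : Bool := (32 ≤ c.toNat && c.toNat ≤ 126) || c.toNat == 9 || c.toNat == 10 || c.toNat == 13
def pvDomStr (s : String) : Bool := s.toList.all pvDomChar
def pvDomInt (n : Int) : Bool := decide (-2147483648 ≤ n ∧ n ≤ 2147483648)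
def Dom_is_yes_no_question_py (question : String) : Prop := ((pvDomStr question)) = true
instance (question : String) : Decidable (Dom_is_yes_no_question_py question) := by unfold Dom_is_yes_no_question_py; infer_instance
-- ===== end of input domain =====

-- B extracts the first word (with its trailing space) and does one set lookup instead of scanning 22 startswith tests.

-- ===== PORT A =====
def is_yes_no_question_py (question : String) : Bool :=
  if question = "" then false
  else
    let q := PySem.Str.lower (PySem.Str.strip question)
    let yn_starts : List String :=
      ["is ", "are ", "was ", "were ", "do ", "does ", "did ", "can ",
       "could ", "should ", "would ", "will ", "has ", "have ", "had ",
       "isn't ", "aren't ", "doesn't ", "can't ", "won't ", "haven't ", "hasn't "]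
    yn_starts.any (fun s => PySem.Str.startswith q s)

-- ===== PORT B =====
def ynSet : PySem.Set String :=
  PySem.Set.ofList
    ["is ", "are ", "was ", "were ", "do ", "does ", "did ", "can ",
     "could ", "should ", "would ", "will ", "has ", "have ", "had ",
     "isn't ", "aren't ", "doesn't ", "can't ", "won't ", "haven't ", "hasn't "]

def is_yes_no_question_py_alt (question : String) : Bool :=
  if question = "" then false
  else
    let q := PySem.Str.lower (PySem.Str.strip question)
    let idx := PySem.Str.find q " "
    if idx = -1 then false
    else PySem.Set.contains ynSet (PySem.Str.slice q none (some (idx + 1)))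

-- ===== PRECONDITION & SPEC =====
def Spec_is_yes_no_question_py (question : String) (out : Bool) : Prop := out = is_yes_no_question_py_alt question
instance (question : String) (out : Bool) : Decidable (Spec_is_yes_no_question_py question out) := by unfold Spec_is_yes_no_question_py; infer_instance

-- ===== CLAIM (what is proved, stated in full; the proofs are below) =====
def Claim_equal_is_yes_no_question_py : Prop := ∀ (question : String), Dom_is_yes_no_question_py question → Spec_is_yes_no_question_py question (is_yes_no_question_py question)

-- ===== LEMMAS AND PROOFS =====

-- the 22 prefixes at the char-list level
def ynL : List (List Char) :=
  ["is ", "are ", "was ", "were ", "do ", "does ", "did ", "can ",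
   "could ", "should ", "would ", "will ", "has ", "have ", "had ",
   "isn't ", "aren't ", "doesn't ", "can't ", "won't ", "haven't ", "hasn't "].map String.toList

lemma ynL_shape' : ∀ w ∈ ynL, w.dropLast ++ [' '] = w ∧ ' ' ∉ w.dropLast := by decide

lemma ynL_shape : ∀ w ∈ ynL, ∃ v, w = v ++ [' '] ∧ ' ' ∉ v := by
  intro w hw
  exact ⟨w.dropLast, (ynL_shape' w hw).1.symm, (ynL_shape' w hw).2⟩

lemma startswith_false (v : List Char) (_hv : ' ' ∉ v) (l : List Char)
    (hf : PySem.Chars.find l [' '] = -1) :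
    PySem.Chars.startswith l (v ++ [' ']) = false := by
  by_contra h
  have hsw : PySem.Chars.startswith l (v ++ [' ']) = true := by
    cases hb : PySem.Chars.startswith l (v ++ [' ']) with
    | false => exact absurd hb h
    | true => rfl
  have hpre : v ++ [' '] <+: l := (PySem.Chars.startswith_iff l (v ++ [' '])).mp hsw
  have : [' '] <:+: l :=
    List.IsInfix.trans (List.suffix_append v [' ']).isInfix hpre.isInfix
  exact (PySem.Chars.find_eq_neg_one_iff l [' ']).mp hf this

lemma startswith_iff_take (v : List Char) (hv : ' ' ∉ v) (l : List Char)
    (hf : PySem.Chars.find l [' '] ≠ -1) :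
    (PySem.Chars.startswith l (v ++ [' ']) = true ↔
      l.take ((PySem.Chars.find l [' ']).toNat + 1) = v ++ [' ']) := by
  constructor
  · intro hsw
    have hpre : v ++ [' '] <+: l := (PySem.Chars.startswith_iff l (v ++ [' '])).mp hsw
    have hnn : 0 ≤ PySem.Chars.find l [' '] := by
      have := PySem.Chars.neg_one_le_find l [' ']
      omega
    obtain ⟨hp, hmin⟩ := PySem.Chars.find_spec (s := l) (sub := [' ']) hnn
    set f := (PySem.Chars.find l [' ']).toNat with hfdef
    obtain ⟨t, ht⟩ := hpre
    -- [' '] is a prefix of l.drop v.length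
    have hdrop : [' '] <+: l.drop v.length := by
      rw [← ht]
      rw [List.append_assoc, List.drop_left]
      exact ⟨t, rfl⟩
    have hle : f ≤ v.length := by
      by_contra hgt
      exact hmin v.length (by omega) hdrop
    have heq : f = v.length := by
      rcases Nat.lt_or_ge f v.length with hlt | hge
      · exfalso
        obtain ⟨s, hs⟩ := hp
        have h0 : l[f]? = some ' ' := by
          have : (l.drop f)[0]? = some ' ' := by rw [← hs]; rfl
          simpa using this
        have hvf : l[f]? = v[f]? := by
          rw [← ht, List.append_assoc]
          exact List.getElem?_append_left hlt
        have hvsome : v[f]? = some ' ' := hvf.symm.trans h0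
        exact hv (List.mem_of_getElem? hvsome)
      · omega
    rw [← ht, heq]
    have : v.length + 1 = (v ++ [' ']).length := by simp
    rw [this, List.take_left]
  · intro h
    have : v ++ [' '] <+: l := h ▸ List.take_prefix _ l
    exact (PySem.Chars.startswith_iff l (v ++ [' '])).mpr this

lemma keyChars (l : List Char) :
    ynL.any (fun w => PySem.Chars.startswith l w) =
      (if PySem.Chars.find l [' '] = -1 then false
       else ynL.contains (l.take ((PySem.Chars.find l [' ']).toNat + 1))) := by
  by_cases hf : PySem.Chars.find l [' '] = -1
  · rw [if_pos hf]
    rw [List.any_eq_false]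
    intro w hw
    obtain ⟨v, rfl, hv⟩ := ynL_shape w hw
    simpa using startswith_false v hv l hf
  · rw [if_neg hf]
    rw [Bool.eq_iff_iff, List.any_eq_true, List.contains_iff_exists_mem_beq]
    constructor
    · rintro ⟨w, hw, hsw⟩
      obtain ⟨v, rfl, hv⟩ := ynL_shape w hw
      refine ⟨v ++ [' '], hw, ?_⟩
      have := (startswith_iff_take v hv l hf).mp (by simpa using hsw)
      simp [this]
    · rintro ⟨w, hw, hbeq⟩
      obtain ⟨v, rfl, hv⟩ := ynL_shape w hw
      refine ⟨v ++ [' '], hw, ?_⟩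
      have heq : l.take ((PySem.Chars.find l [' ']).toNat + 1) = v ++ [' '] := by
        simpa using hbeq
      simp [(startswith_iff_take v hv l hf).mpr heq]

-- ===== VERDICT (by name: the statement is the Claim_ definition above) =====
theorem is_yes_no_question_py_spec : Claim_equal_is_yes_no_question_py := by
  intro question _
  unfold Spec_is_yes_no_question_py is_yes_no_question_py is_yes_no_question_py_alt
  by_cases hq : question = ""
  · simp [hq]
  · rw [if_neg hq, if_neg hq]
    set q := PySem.Str.lower (PySem.Str.strip question) with hqdef
    have hL : (["is ", "are ", "was ", "were ", "do ", "does ", "did ", "can ",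
       "could ", "should ", "would ", "will ", "has ", "have ", "had ",
       "isn't ", "aren't ", "doesn't ", "can't ", "won't ", "haven't ", "hasn't "] : List String).any
        (fun s => PySem.Str.startswith q s)
        = ynL.any (fun w => PySem.Chars.startswith q.toList w) := by
      simp [ynL]
    rw [hL, keyChars]
    have hfind : PySem.Str.find q " " = PySem.Chars.find q.toList [' '] := by simp
    by_cases hf : PySem.Chars.find q.toList [' '] = -1
    · simp [hf]
    · rw [if_neg hf, if_neg (by rw [hfind]; exact hf)]
      have h0 : (0:Int) ≤ PySem.Chars.find q.toList [' '] := by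
        have := PySem.Chars.neg_one_le_find q.toList [' ']
        omega
      have hslice : (PySem.Str.slice q none (some (PySem.Str.find q " " + 1))).toList
          = q.toList.take ((PySem.Chars.find q.toList [' ']).toNat + 1) := by
        rw [hfind]
        rw [PySem.Str.toList_slice]
        rw [show PySem.Chars.slice q.toList none (some (PySem.Chars.find q.toList [' '] + 1))
              = q.toList.take (PySem.Chars.find q.toList [' '] + 1).toNat from
            PySem.List.slice_to _ (by omega)]
        rw [show (PySem.Chars.find q.toList [' '] + 1).toNat
              = (PySem.Chars.find q.toList [' ']).toNat + 1 from by omega]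
      have hyn : ynSet = (["is ", "are ", "was ", "were ", "do ", "does ", "did ", "can ",
       "could ", "should ", "would ", "will ", "has ", "have ", "had ",
       "isn't ", "aren't ", "doesn't ", "can't ", "won't ", "haven't ", "hasn't "] : List String) := by decide
      have hcon : ∀ (x : String), PySem.Set.contains ynSet x
          = (["is ", "are ", "was ", "were ", "do ", "does ", "did ", "can ",
       "could ", "should ", "would ", "will ", "has ", "have ", "had ",
       "isn't ", "aren't ", "doesn't ", "can't ", "won't ", "haven't ", "hasn't "] : List String).contains x := by
        intro x
        show List.contains ynSet x = _
        rw [hyn]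
      rw [hcon, Bool.eq_iff_iff, List.contains_iff_mem, List.contains_iff_mem]
      unfold ynL
      constructor
      · intro h
        rw [List.mem_map] at h
        obtain ⟨s, hs, hts⟩ := h
        have : PySem.Str.slice q none (some (PySem.Str.find q " " + 1)) = s := by
          apply String.toList_inj.mp
          rw [hslice, hts]
        rw [this]
        exact hs
      · intro h
        exact List.mem_map.mpr
          ⟨PySem.Str.slice q none (some (PySem.Str.find q " " + 1)), h, hslice⟩
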